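-- pv_equiv track=rewrite | github.com/PianCat/ProxyRules | Generator/utils/yaml_helper.py | add_empty_lines_before_sections
-- ===== SOURCE A (Python) =====
-- from typing import Any, Dict, Union, List
--
-- def add_empty_lines_before_sections(yaml_str: str, sections: List[str]) -> str:
--     """
--     在指定的配置项前添加空行
--
--     Args:
--         yaml_str: YAML 字符串
--         sections: 需要在前面添加空行的配置项列表（如 ['dns:', 'proxy-groups:', 'rules:']）
--
--     Returns:
--         处理后的 YAML 字符串
--     """
--     lines = yaml_str.split('\n')
--     new_lines = []
--
--     for i, line in enumerate(lines):
--         # 检查是否是配置项开始行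
--         line_stripped = line.strip()
--         for section in sections:
--             # 检查是否是配置项（可能是 'dns:' 或 'dns: #!replace' 等）
--             if line_stripped.startswith(section):
--                 # 如果前一行不是空行，且不是第一行，则添加空行
--                 if i > 0 and new_lines and new_lines[-1].strip() != '':
--                     new_lines.append('')
--                 break
--
--         new_lines.append(line)
--
--     return '\n'.join(new_lines)
-- ===== SOURCE B (Python) =====
-- from typing import List
--
-- def add_empty_lines_before_sections(yaml_str: str, sections: List[str]) -> str:
--     lines = yaml_str.split('\n')
--     pref = tuple(sections)
--     # pass 1: indices that need a blank line inserted before them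
--     marks = {i for i in range(len(lines))
--              if i > 0 and lines[i].strip().startswith(pref)
--              and lines[i - 1].strip() != ''}
--     # pass 2: rebuild
--     out = []
--     for i, line in enumerate(lines):
--         if i in marks:
--             out.append('')
--         out.append(line)
--     return '\n'.join(out)
-- ===== Notes on version B (the rewrite author's own statement) =====
-- stated objective: alternative
-- what changed: Replaces A's single pass that inspects the last element of the growing output list with two passes: a first pass precomputes the set of line indices needing a preceding blank (checking the original previous line instead of the emitted output), and a second pass rebuilds the output from that index set.
import Mathlib
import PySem

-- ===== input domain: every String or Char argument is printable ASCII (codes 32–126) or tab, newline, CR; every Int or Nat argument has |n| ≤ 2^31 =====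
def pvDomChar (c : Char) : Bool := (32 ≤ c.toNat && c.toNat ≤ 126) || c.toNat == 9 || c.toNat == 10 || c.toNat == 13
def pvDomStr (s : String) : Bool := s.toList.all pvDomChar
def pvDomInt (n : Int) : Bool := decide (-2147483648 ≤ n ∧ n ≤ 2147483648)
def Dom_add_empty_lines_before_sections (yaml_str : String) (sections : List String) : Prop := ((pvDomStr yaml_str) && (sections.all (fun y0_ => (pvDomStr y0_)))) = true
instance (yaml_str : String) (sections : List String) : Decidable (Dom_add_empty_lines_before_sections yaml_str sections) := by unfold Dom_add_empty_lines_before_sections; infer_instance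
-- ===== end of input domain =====

-- B replaces A's running check of the last emitted output element by a precomputed index
-- set over the original lines (two passes); same cost, alternative decomposition.

-- ===== PORT A =====
-- the inner `for section in sections: if …: …; break` loop of A
def pvALoop (sections : List String) (line_stripped : String) (i : Int)
    (new_lines : List String) : List String :=
  match sections with
  | [] => new_lines
  | sec :: rest =>
    if PySem.Str.startswith line_stripped sec then
      -- `if i > 0 and new_lines and new_lines[-1].strip() != '': new_lines.append('')`
      if 0 < i ∧ new_lines ≠ [] ∧ PySem.Str.strip (PySem.List.pyGetD new_lines (-1) "") ≠ "" then
        new_lines ++ [""]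
      else new_lines
    else pvALoop rest line_stripped i new_lines

def add_empty_lines_before_sections (yaml_str : String) (sections : List String) : String :=
  let lines := (PySem.Chars.splitOn yaml_str.toList ['\n']).map String.ofList
  let new_lines := (PySem.List.enumerate lines 0).foldl
    (fun acc p =>
      let line_stripped := PySem.Str.strip p.2
      (pvALoop sections line_stripped p.1 acc) ++ [p.2]) []
  PySem.Str.join "\n" new_lines

-- ===== PORT B =====
-- `stripped.startswith(pref)` with pref = tuple(sections)
def pvStartsAny (pref : List String) (s : String) : Bool :=
  pref.any (fun sec => PySem.Str.startswith s sec)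

-- the set comprehension of B: indices needing a preceding blank line
def pvMarks (lines : List String) (pref : List String) : List Int :=
  (PySem.List.pyRange 0 lines.length 1).filter
    (fun i => decide (0 < i) && pvStartsAny pref (PySem.Str.strip (PySem.List.pyGetD lines i ""))
              && (PySem.Str.strip (PySem.List.pyGetD lines (i - 1) "") != ""))

def add_empty_lines_before_sections_alt (yaml_str : String) (sections : List String) : String :=
  let lines := (PySem.Chars.splitOn yaml_str.toList ['\n']).map String.ofList
  let marks := pvMarks lines sections
  let out := (PySem.List.enumerate lines 0).foldl
    (fun acc p => (if marks.contains p.1 then acc ++ [""] else acc) ++ [p.2]) []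
  PySem.Str.join "\n" out

-- ===== PRECONDITION & SPEC =====
def Spec_add_empty_lines_before_sections (yaml_str : String) (sections : List String) (out : String) : Prop := out = add_empty_lines_before_sections_alt yaml_str sections
instance (yaml_str : String) (sections : List String) (out : String) : Decidable (Spec_add_empty_lines_before_sections yaml_str sections out) := by unfold Spec_add_empty_lines_before_sections; infer_instance

-- ===== CLAIM (what is proved, stated in full; the proofs are below) =====
def Claim_equal_add_empty_lines_before_sections : Prop := ∀ (yaml_str : String) (sections : List String), Dom_add_empty_lines_before_sections yaml_str sections → Spec_add_empty_lines_before_sections yaml_str sections (add_empty_lines_before_sections yaml_str sections)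

-- ===== LEMMAS AND PROOFS =====

-- closed form of A's inner break loop
theorem pvALoop_eq (sections : List String) (st : String) (i : Int) (acc : List String) :
    pvALoop sections st i acc =
      if pvStartsAny sections st = true
         ∧ 0 < i ∧ acc ≠ [] ∧ PySem.Str.strip (PySem.List.pyGetD acc (-1) "") ≠ "" then
        acc ++ [""]
      else acc := by
  induction sections with
  | nil => simp [pvALoop, pvStartsAny]
  | cons sec rest ih =>
    simp only [pvALoop, pvStartsAny, List.any_cons, ih, Bool.or_eq_true, pvStartsAny]
    by_cases h : PySem.Chars.startswith st.toList sec.toList = true <;> simp [h]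

-- membership in B's mark set, for a natural index
theorem mem_pvMarks (lines pref : List String) (k : Nat) :
    (pvMarks lines pref).contains (k : Int) = true ↔
      (k < lines.length ∧ 0 < k ∧
        pvStartsAny pref (PySem.Str.strip (lines.getD k "")) = true ∧
        PySem.Str.strip (lines.getD (k - 1) "") ≠ "") := by
  rw [List.contains_iff_mem]
  simp only [pvMarks, List.mem_filter, PySem.List.mem_pyRange_one, Bool.and_eq_true,
    decide_eq_true_eq, bne_iff_ne, ne_eq, PySem.List.pyGetD_natCast]
  constructor
  · rintro ⟨⟨-, hlt⟩, ⟨hpos, hany⟩, hprev⟩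
    have hk : 0 < k := by exact_mod_cast hpos
    have : ((k : Int) - 1) = ((k - 1 : Nat) : Int) := by omega
    rw [this, PySem.List.pyGetD_natCast] at hprev
    exact ⟨by exact_mod_cast hlt, hk, hany, hprev⟩
  · rintro ⟨hlt, hk, hany, hprev⟩
    have : ((k : Int) - 1) = ((k - 1 : Nat) : Int) := by omega
    refine ⟨⟨by positivity, by exact_mod_cast hlt⟩, ⟨by exact_mod_cast hk, hany⟩, ?_⟩
    rw [this, PySem.List.pyGetD_natCast]; exact hprev

-- the main loop invariant: A never ends the output in an inserted blank, its last element
-- is the previous ORIGINAL line, so A's fold and B's fold agree on the remaining lines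
theorem pv_fold_eq (pref : List String) (lines : List String) :
    ∀ (l : List String) (k : Nat) (acc : List String),
      lines.drop k = l →
      (k = 0 → acc = []) →
      (0 < k → acc ≠ [] ∧ PySem.List.pyGetD acc (-1) "" = lines.getD (k - 1) "") →
      (PySem.List.enumerate l (k : Int)).foldl
        (fun acc p => (pvALoop pref (PySem.Str.strip p.2) p.1 acc) ++ [p.2]) acc
      = (PySem.List.enumerate l (k : Int)).foldl
        (fun acc p => (if (pvMarks lines pref).contains p.1 then acc ++ [""] else acc) ++ [p.2]) acc := by
  intro l
  induction l with
  | nil => intro k acc _ _ _; simp [PySem.List.enumerate_nil]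
  | cons x l' ih =>
    intro k acc hdrop h0 hpos
    have hk : k < lines.length := by
      have h := congrArg List.length hdrop
      rw [List.length_drop] at h
      simp at h
      omega
    have hx : lines.getD k "" = x := by
      have : lines[k]'hk = (lines.drop k)[0]'(by rw [hdrop]; simp) := by
        simp [List.getElem_drop]
      rw [List.getD_eq_getElem _ _ hk, this]
      simp [hdrop]
    have hdrop' : lines.drop (k + 1) = l' := by
      have : lines.drop (k + 1) = (lines.drop k).drop 1 := by rw [List.drop_drop]
      rw [this, hdrop]; rfl
    simp only [PySem.List.enumerate_cons, List.foldl_cons]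
    have hc : (pvStartsAny pref (PySem.Str.strip x) = true
         ∧ 0 < (k : Int) ∧ acc ≠ [] ∧ PySem.Str.strip (PySem.List.pyGetD acc (-1) "") ≠ "")
        ↔ ((pvMarks lines pref).contains (k : Int) = true) := by
      rw [mem_pvMarks]
      rcases Nat.eq_zero_or_pos k with h | h
      · subst h; simp [h0 rfl]
      · obtain ⟨hne, hlast⟩ := hpos h
        rw [hx, hlast]
        constructor
        · rintro ⟨hany, -, -, hprev⟩; exact ⟨hk, h, hany, hprev⟩
        · rintro ⟨-, -, hany, hprev⟩; exact ⟨hany, by exact_mod_cast h, hne, hprev⟩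
    have hstep : (pvALoop pref (PySem.Str.strip x) (k : Int) acc) ++ [x]
        = (if (pvMarks lines pref).contains (k : Int) then acc ++ [""] else acc) ++ [x] := by
      rw [pvALoop_eq]
      by_cases hm : (pvMarks lines pref).contains (k : Int) = true
      · rw [if_pos (hc.mpr hm), if_pos hm]
      · rw [if_neg (fun h => hm (hc.mp h)), if_neg hm]
    rw [hstep]
    have : ((k : Int) + 1) = ((k + 1 : Nat) : Int) := by push_cast; ring
    rw [this]
    apply ih (k + 1) _ hdrop' (by omega)
    intro _
    refine ⟨by simp, ?_⟩
    rw [PySem.List.pyGetD_neg_one_append_singleton]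
    simpa using hx.symm

-- ===== VERDICT (by name: the statement is the Claim_ definition above) =====
theorem add_empty_lines_before_sections_spec : Claim_equal_add_empty_lines_before_sections := by
  intro yaml_str sections _
  unfold Spec_add_empty_lines_before_sections
  simp only [add_empty_lines_before_sections, add_empty_lines_before_sections_alt]
  have h := pv_fold_eq sections
      ((PySem.Chars.splitOn yaml_str.toList ['\n']).map String.ofList)
      ((PySem.Chars.splitOn yaml_str.toList ['\n']).map String.ofList) 0 []
      (by simp) (fun _ => rfl) (by omega)
  simp only [Nat.cast_zero] at h
  exact congrArg (PySem.Str.join "\n") h
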